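-- pv_equiv track=rewrite | github.com/UMBC-CMSC-Hamilton/cmsc201fall23 | final_review_1pm.py | force_sort
-- ===== SOURCE A (Python) =====
-- def force_sort(a_list):
--     if not a_list:
--         return []
--     the_new_list = [a_list[0]]
--     current = a_list[0]
--     for i in range(1, len(a_list)):
--         if a_list[i] >= current:
--             the_new_list.append(a_list[i])
--             current = a_list[i]
--
--     return the_new_list
-- ===== SOURCE B (Python) =====
-- def force_sort(a_list):
--     prefix = []
--     m = None
--     for x in a_list:
--         m = x if m is None or x > m else m
--         prefix.append(m)
--     return [x for x, m in zip(a_list, prefix) if x == m]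
-- ===== Notes on version B (the rewrite author's own statement) =====
-- stated objective: alternative
-- what changed: replaces the single stateful greedy scan (append when element >= running max) with a precompute-prefix-maxima-table pass followed by a zip/filter comprehension keeping elements equal to their prefix max
import Mathlib
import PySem

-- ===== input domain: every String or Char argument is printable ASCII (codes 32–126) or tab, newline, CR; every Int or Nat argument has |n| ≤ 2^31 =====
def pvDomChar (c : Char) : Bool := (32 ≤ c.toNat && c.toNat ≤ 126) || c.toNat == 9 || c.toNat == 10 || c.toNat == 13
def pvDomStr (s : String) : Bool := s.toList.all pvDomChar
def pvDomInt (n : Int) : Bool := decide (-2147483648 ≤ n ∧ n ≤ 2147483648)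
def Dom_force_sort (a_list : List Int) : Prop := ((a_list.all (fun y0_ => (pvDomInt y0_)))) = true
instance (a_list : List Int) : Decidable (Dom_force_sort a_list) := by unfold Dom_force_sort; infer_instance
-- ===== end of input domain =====

-- B replaces A's single stateful greedy scan by a prefix-maxima table plus a zip/filter pass (alternative decomposition, same O(n) cost).

-- ===== PORT A =====
-- literal transliteration of A: guard on empty, then index loop for i in range(1, len) with running 'current'
def force_sort (a_list : List Int) : List Int :=
  match a_list with
  | [] => []
  | x :: _ =>
    let st := (PySem.List.pyRange 1 (a_list.length : Int) 1).foldl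
      (fun (st : List Int × Int) i =>
        if st.2 ≤ PySem.List.pyGetD a_list i 0 then
          (st.1 ++ [PySem.List.pyGetD a_list i 0], PySem.List.pyGetD a_list i 0)
        else st)
      ([x], x)
    st.1

-- ===== PORT B =====
-- transliteration of Source B: build the prefix-maxima list with (prefix, m) state, then zip/filter/map
def force_sort_alt (a_list : List Int) : List Int :=
  let st := a_list.foldl
    (fun (st : List Int × Option Int) x =>
      let m := match st.2 with
        | none => x
        | some m0 => if m0 < x then x else m0
      (st.1 ++ [m], some m))
    ([], none)
  ((a_list.zip st.1).filter (fun p => p.1 == p.2)).map (·.1)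

-- ===== PRECONDITION & SPEC =====
def Spec_force_sort (a_list : List Int) (out : List Int) : Prop := out = force_sort_alt a_list
instance (a_list : List Int) (out : List Int) : Decidable (Spec_force_sort a_list out) := by unfold Spec_force_sort; infer_instance

-- ===== CLAIM (what is proved, stated in full; the proofs are below) =====
def Claim_equal_force_sort : Prop := ∀ (a_list : List Int), Dom_force_sort a_list → Spec_force_sort a_list (force_sort a_list)

-- ===== LEMMAS AND PROOFS =====

-- proof-side common form: A's greedy scan as structural recursion
def pvGreedy (c : Int) : List Int → List Int
  | [] => []
  | y :: ys => if c ≤ y then y :: pvGreedy y ys else pvGreedy c ys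

-- proof-side: the prefix-maxima list B builds
def pvScan (m : Option Int) : List Int → List Int
  | [] => []
  | x :: xs =>
    let m' := match m with
      | none => x
      | some c => if c < x then x else c
    m' :: pvScan (some m') xs

theorem pvA_fold (xs : List Int) : ∀ (acc : List Int) (c : Int),
    (xs.foldl (fun (st : List Int × Int) v =>
      if st.2 ≤ v then (st.1 ++ [v], v) else st) (acc, c)).1 = acc ++ pvGreedy c xs := by
  induction xs with
  | nil => intro acc c; simp [pvGreedy]
  | cons y ys ih =>
    intro acc c
    simp only [List.foldl_cons, pvGreedy]
    by_cases h : c ≤ y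
    · simp [h, ih]
    · simp [h, ih]

theorem pvB_fold (xs : List Int) : ∀ (acc : List Int) (m : Option Int),
    (xs.foldl (fun (st : List Int × Option Int) x =>
      let m := match st.2 with
        | none => x
        | some m0 => if m0 < x then x else m0
      (st.1 ++ [m], some m)) (acc, m)).1 = acc ++ pvScan m xs := by
  induction xs with
  | nil => intro acc m; simp [pvScan]
  | cons x xs ih =>
    intro acc m
    cases m with
    | none => simp [pvScan, ih]
    | some c => simp [pvScan, ih]

theorem pvZipFilter (xs : List Int) : ∀ (c : Int),
    ((xs.zip (pvScan (some c) xs)).filter (fun p => p.1 == p.2)).map (·.1) = pvGreedy c xs := by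
  induction xs with
  | nil => intro c; simp [pvScan, pvGreedy]
  | cons x xs ih =>
    intro c
    simp only [pvScan, pvGreedy]
    by_cases h : c < x
    · simp [h, show c ≤ x from le_of_lt h, ih]
    · by_cases h2 : c = x
      · subst h2
        simp [ih]
      · have hx : x < c := lt_of_le_of_ne (not_lt.mp h) (Ne.symm h2)
        simp [h, not_le.mpr hx, hx.ne, ih]

theorem force_sort_eq (l : List Int) : force_sort l = force_sort_alt l := by
  cases l with
  | nil => rfl
  | cons x xs =>
    have hA : force_sort (x :: xs) =
        ((PySem.List.pyRange 1 ((x :: xs).length : Int) 1).foldl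
          (fun (st : List Int × Int) i =>
            if st.2 ≤ PySem.List.pyGetD (x :: xs) i 0 then
              (st.1 ++ [PySem.List.pyGetD (x :: xs) i 0], PySem.List.pyGetD (x :: xs) i 0)
            else st)
          ([x], x)).1 := rfl
    rw [hA, PySem.List.foldl_pyRange_pyGetD' (x :: xs) 0
      (fun (st : List Int × Int) v => if st.2 ≤ v then (st.1 ++ [v], v) else st) ([x], x) (by omega : (0:Int) ≤ 1)]
    simp only [Int.toNat_one, List.drop_succ_cons, List.drop_zero]
    rw [pvA_fold]
    simp only [force_sort_alt]
    rw [pvB_fold]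
    simp [pvScan, pvZipFilter]

-- ===== VERDICT (by name: the statement is the Claim_ definition above) =====
theorem force_sort_spec : Claim_equal_force_sort := by
  intro l _
  unfold Spec_force_sort
  exact force_sort_eq l
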